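-- pv_equiv track=rewrite | github.com/mik5plays/muic-archive | intro-to-programming/Assignment 4/sansprimes.py | sans_primes
-- ===== SOURCE A (Python) =====
-- def is_prime(n:int) -> bool:
--     if n < 2:
--         return False
--     #Gonna try every number from 1 to itself. If it doesn't reach a "score" of 3 (divisible by 1, itself, and 1 other number), it is a prime.
--     numDivs: int = 0
--     for i in range(1, n+1):
--         if n%i == 0:
--             numDivs += 1
--     if numDivs < 3:
--         return True
--     return False
--
-- def sans_primes(numbers: list[int]) -> list[int]:
--     followingPrime: bool = False
--     for i in range(len(numbers)):
--         if is_prime(numbers[i]):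
--             if not followingPrime:
--                 followingPrime = True
--             numbers[i] = "" #Blank placeholder
--         elif not is_prime(numbers[i]):
--             if followingPrime:
--                 numbers[i] = "" #Blank placeholder
--             followingPrime = False
--     #Removing the placeholder for the return value.
--     return [x for x in numbers if x != ""]
-- ===== SOURCE B (Python) =====
-- def is_prime(n: int) -> bool:
--     if n < 2:
--         return False
--     d = 2
--     while d * d <= n:
--         if n % d == 0:
--             return False
--         d += 1
--     return True
--
-- def sans_primes(numbers: list[int]) -> list[int]:
--     flags = [is_prime(x) for x in numbers]
--     for i in range(len(numbers)):
--         if flags[i] or (i > 0 and flags[i - 1]):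
--             numbers[i] = ""  # same blank placeholder mutation as the original
--     return [x for x in numbers if x != ""]
-- ===== Notes on version B (the rewrite author's own statement) =====
-- stated objective: alternative
-- what changed: is_prime now uses trial division up to sqrt(n) instead of counting all n divisors, and the removal pass replaces the threaded followingPrime carry by a precomputed prime-flag table consulted at i and i-1.
import Mathlib
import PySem

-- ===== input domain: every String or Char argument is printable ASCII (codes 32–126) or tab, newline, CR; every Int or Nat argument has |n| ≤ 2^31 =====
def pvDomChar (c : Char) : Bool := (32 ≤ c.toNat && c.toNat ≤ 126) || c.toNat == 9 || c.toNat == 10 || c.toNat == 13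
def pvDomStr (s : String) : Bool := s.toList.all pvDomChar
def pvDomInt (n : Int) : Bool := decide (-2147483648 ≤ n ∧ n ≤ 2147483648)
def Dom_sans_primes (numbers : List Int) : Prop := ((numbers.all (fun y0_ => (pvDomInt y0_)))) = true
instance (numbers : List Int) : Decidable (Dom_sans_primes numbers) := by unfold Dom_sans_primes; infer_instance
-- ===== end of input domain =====

-- B replaces A's single pass with its threaded followingPrime carry by a precomputed prime-flag
-- table consulted at i and i-1, and A's divisor-counting is_prime by trial division bounded by √n
-- (objective: alternative decomposition).  Both Pythons mutate the argument list in place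
-- (the same '' placeholders at the same positions); the theorems here are about the return value.

-- ===== PORT A =====
def pvIsPrime (n : Int) : Bool :=
  if n < 2 then false
  else
    let numDivs : Int := (PySem.List.pyRange 1 (n+1) 1).foldl
      (fun acc i => if PySem.Int.mod n i == 0 then acc + 1 else acc) 0
    if numDivs < 3 then true else false

def pvStepA (st : List (Option Int) × Bool) (i : Nat) : List (Option Int) × Bool :=
  match st.1[i]? with
  | some (some x) =>
      if pvIsPrime x then (st.1.set i none, true)
      else if !(pvIsPrime x) then
        (if st.2 then st.1.set i none else st.1, false)
      else st
  | _ => st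

def sans_primes (numbers : List Int) : List Int :=
  let res := (List.range numbers.length).foldl pvStepA (numbers.map some, false)
  res.1.filterMap id

-- ===== PORT B =====
def pvIsPrimeAltLoop (n d : Int) : Bool :=
  if h : d * d ≤ n then
    if PySem.Int.mod n d == 0 then false else pvIsPrimeAltLoop n (d+1)
  else true
termination_by (n + 1 - d).toNat
decreasing_by
  have h1 : (0:Int) ≤ d * d := mul_self_nonneg d
  have h2 : d ≤ d * d := by nlinarith [mul_self_nonneg (d - 1), mul_self_nonneg d]
  omega

def pvIsPrimeAlt (n : Int) : Bool :=
  if n < 2 then false else pvIsPrimeAltLoop n 2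

def pvStepB (flags : List Bool) (xs : List (Option Int)) (i : Nat) : List (Option Int) :=
  if flags.getD i false || (decide (0 < i) && flags.getD (i-1) false) then xs.set i none else xs

def sans_primes_alt (numbers : List Int) : List Int :=
  let flags := numbers.map pvIsPrimeAlt
  let marked := (List.range numbers.length).foldl (pvStepB flags) (numbers.map some)
  marked.filterMap id

-- ===== PRECONDITION & SPEC =====
def Spec_sans_primes (numbers : List Int) (out : List Int) : Prop := out = sans_primes_alt numbers
instance (numbers : List Int) (out : List Int) : Decidable (Spec_sans_primes numbers out) := by unfold Spec_sans_primes; infer_instance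

-- ===== CLAIM (what is proved, stated in full; the proofs are below) =====
def Claim_equal_sans_primes : Prop := ∀ (numbers : List Int), Dom_sans_primes numbers → Spec_sans_primes numbers (sans_primes numbers)

-- ===== LEMMAS AND PROOFS =====

/-- The common shape of the marking both passes perform: blank an element iff it is prime
or the previous one was. -/
def pvMark (p : Int → Bool) (prev : Bool) : List Int → List (Option Int)
  | [] => []
  | x :: xs => (if p x || prev then none else some x) :: pvMark p (p x) xs

def pvLastFlag (p : Int → Bool) (prev : Bool) : List Int → Bool
  | [] => prev
  | x :: xs => pvLastFlag p (p x) xs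

-- counting fold = countP
lemma pv_count_foldl (c : Int → Bool) (l : List Int) : ∀ s : Int,
    l.foldl (fun acc i => if c i then acc + 1 else acc) s = s + (l.countP c : Int) := by
  induction l with
  | nil => simp
  | cons x xs ih =>
      intro s
      by_cases h : c x <;> simp [h, ih] <;> ring

lemma pv_count_div_lt_three {m : Nat} (hm : 2 ≤ m) :
    ((List.range m).countP (fun k => decide ((1 + k) ∣ m)) < 3)
      ↔ ∀ d, 2 ≤ d → d < m → ¬ d ∣ m := by
  obtain ⟨j, rfl⟩ : ∃ j, m = j + 2 := ⟨m - 2, by omega⟩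
  have hr : List.range (j + 2) = 0 :: (List.range' 1 j ++ [j + 1]) := by
    rw [List.range_eq_range', show j + 2 = (j + 1) + 1 from rfl, List.range'_succ]
    congr 1
    rw [List.range'_concat]
    simp [Nat.add_comm]
  have e1 : (decide ((1 + 0) ∣ (j + 2))) = true := by simp
  have e2 : (decide ((1 + (j + 1)) ∣ (j + 2))) = true := by
    simp [show 1 + (j + 1) = j + 2 by omega]
  rw [hr]
  simp only [List.countP_cons, List.countP_append, List.countP_nil, e1, e2, if_pos]
  constructor
  · intro h d hd2 hdm hdvd
    have hmem : d - 1 ∈ List.range' 1 j := by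
      rw [List.mem_range'_1]; omega
    have hpos : 0 < (List.range' 1 j).countP (fun k => decide ((1 + k) ∣ (j + 2))) := by
      apply List.countP_pos_iff.mpr
      refine ⟨d - 1, hmem, ?_⟩
      simp only [decide_eq_true_eq, show 1 + (d - 1) = d by omega]
      exact hdvd
    omega
  · intro h
    have hz : (List.range' 1 j).countP (fun k => decide ((1 + k) ∣ (j + 2))) = 0 := by
      apply List.countP_eq_zero.mpr
      intro k hk
      rw [List.mem_range'_1] at hk
      simp only [decide_eq_true_eq]
      exact h (1 + k) (by omega) (by omega)
    omega

lemma pv_isPrime_iff {n : Int} (hn : 2 ≤ n) : (pvIsPrime n = true ↔ Nat.Prime n.toNat) := by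
  have hnn : ¬ n < 2 := by omega
  have hm2 : 2 ≤ n.toNat := by omega
  have hcast : n = ((n.toNat : Nat) : Int) := by omega
  rw [pvIsPrime]
  simp only [hnn, if_false]
  rw [PySem.List.pyRange_one]
  have hlen : (n + 1 - 1).toNat = n.toNat := by omega
  rw [hlen, pv_count_foldl]
  rw [List.countP_map]
  have hpred : ∀ k ∈ List.range n.toNat,
      (((fun i => PySem.Int.mod n i == 0) ∘ (fun k : Nat => 1 + (k : Int))) k = true)
        ↔ (decide ((1 + k) ∣ n.toNat) = true) := by
    intro k _
    simp only [Function.comp, beq_iff_eq, decide_eq_true_eq]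
    rw [PySem.Int.mod_eq_zero_iff_dvd]
    constructor
    · intro hdvd
      rw [hcast] at hdvd
      exact_mod_cast hdvd
    · intro hdvd
      rw [hcast]
      exact_mod_cast hdvd
  rw [List.countP_congr hpred]
  have hcount := pv_count_div_lt_three hm2
  rw [Nat.prime_def_lt']
  constructor
  · intro h
    refine ⟨hm2, hcount.mp ?_⟩
    split at h
    · next hlt => omega
    · exact absurd h (by simp)
  · intro ⟨_, h⟩
    have hlt := hcount.mpr h
    split
    · rfl
    · next hge => omega

lemma pv_loop_iff (n : Int) : ∀ (d : Int), 2 ≤ d →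
    (pvIsPrimeAltLoop n d = true ↔ ∀ e : Int, d ≤ e → e * e ≤ n → PySem.Int.mod n e ≠ 0) := by
  intro d
  induction d using pvIsPrimeAltLoop.induct n with
  | case1 d hle hmod =>
      intro _
      rw [pvIsPrimeAltLoop]
      simp only [hle, dif_pos, hmod, if_pos]
      rw [beq_iff_eq] at hmod
      constructor
      · intro h; exact absurd h (by simp)
      · intro h; exact absurd hmod (h d le_rfl hle)
  | case2 d hle hmod ih =>
      intro hd2
      rw [pvIsPrimeAltLoop]
      simp only [hle, dif_pos, hmod, if_neg, Bool.not_eq_true]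
      rw [ih (by omega)]
      simp only [beq_iff_eq, ← ne_eq] at hmod
      constructor
      · intro h e hde hee
        by_cases he : e = d
        · subst he; exact hmod
        · exact h e (by omega) hee
      · intro h e hde hee
        exact h e (by omega) hee
  | case3 d hle =>
      intro hd2
      rw [pvIsPrimeAltLoop]
      simp only [hle]
      constructor
      · intro _ e hde hee
        exfalso
        have : d * d ≤ e * e := by nlinarith
        omega
      · intro _; rfl

lemma pv_isPrimeAlt_iff {n : Int} (hn : 2 ≤ n) : (pvIsPrimeAlt n = true ↔ Nat.Prime n.toNat) := by
  have hnn : ¬ n < 2 := by omega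
  have hcast : n = ((n.toNat : Nat) : Int) := by omega
  rw [pvIsPrimeAlt]
  simp only [hnn, if_false]
  rw [pv_loop_iff n 2 le_rfl, Nat.prime_def_le_sqrt]
  have hm2 : 2 ≤ n.toNat := by omega
  constructor
  · intro h
    refine ⟨hm2, ?_⟩
    intro a ha2 hasq hdvd
    have h1 : a * a ≤ n.toNat := Nat.le_sqrt.mp hasq
    have hlea : (a : Int) * a ≤ n := by
      have h2 : ((a * a : Nat) : Int) ≤ ((n.toNat : Nat) : Int) := by exact_mod_cast h1
      push_cast at h2
      omega
    refine h (a : Int) (by exact_mod_cast ha2) hlea ?_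
    rw [PySem.Int.mod_eq_zero_iff_dvd, hcast]
    exact_mod_cast hdvd
  · intro ⟨_, h⟩ e he2 hee hmod
    have he' : ((e.toNat : Nat) : Int) = e := Int.toNat_of_nonneg (by omega)
    have hdvd : e.toNat ∣ n.toNat := by
      have hd := (PySem.Int.mod_eq_zero_iff_dvd n e).mp hmod
      rw [← he', hcast] at hd
      exact_mod_cast hd
    refine h e.toNat (by omega) ?_ hdvd
    rw [Nat.le_sqrt]
    have h2 : ((e.toNat : Nat) : Int) * ((e.toNat : Nat) : Int) ≤ ((n.toNat : Nat) : Int) := by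
      rw [he']
      exact le_trans hee (by omega)
    exact_mod_cast h2

lemma pv_prime_eq : pvIsPrime = pvIsPrimeAlt := by
  funext n
  by_cases hn : n < 2
  · rw [pvIsPrime, pvIsPrimeAlt]; simp [hn]
  · have h1 := pv_isPrime_iff (n := n) (by omega)
    have h2 := pv_isPrimeAlt_iff (n := n) (by omega)
    by_cases hp : Nat.Prime n.toNat
    · rw [h1.mpr hp, h2.mpr hp]
    · cases hA : pvIsPrime n
      · cases hB : pvIsPrimeAlt n
        · rfl
        · exact absurd (h2.mp hB) hp
      · exact absurd (h1.mp hA) hp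

-- A's fold realises pvMark
lemma pv_foldA_inv : ∀ (suf : List Int) (done : List (Option Int)) (fp : Bool),
    (List.range' done.length suf.length).foldl pvStepA (done ++ suf.map some, fp)
      = (done ++ pvMark pvIsPrime fp suf, pvLastFlag pvIsPrime fp suf) := by
  intro suf
  induction suf with
  | nil => intro done fp; simp [pvMark, pvLastFlag]
  | cons x rest ih =>
      intro done fp
      rw [List.length_cons, List.range'_succ, List.foldl_cons]
      have hget : (done ++ (x :: rest).map some)[done.length]? = some (some x) := by
        rw [List.getElem?_append_right le_rfl]
        simp
      have hset : ∀ v : Option Int,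
          (done ++ (x :: rest).map some).set done.length v = (done ++ [v]) ++ rest.map some := by
        intro v
        rw [List.set_append_right _ _ le_rfl]
        simp
      have hstep : pvStepA (done ++ (x :: rest).map some, fp) done.length
          = ((done ++ [if pvIsPrime x || fp then none else some x]) ++ rest.map some, pvIsPrime x) := by
        rw [pvStepA]
        simp only [hget]
        by_cases hpx : pvIsPrime x
        · simp [hpx]
        · by_cases hfp : fp
          · simp [hpx, hfp]
          · simp [hpx, hfp]
      rw [hstep]
      have hlen : done.length + 1 = (done ++ [if pvIsPrime x || fp then none else some x]).length := by
        simp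
      rw [hlen, ih]
      simp [pvMark, pvLastFlag]

-- B's fold realises pvMark
lemma pv_foldB_inv : ∀ (suf pre : List Int) (done : List (Option Int)) (prev : Bool),
    done.length = pre.length →
    (decide (0 < pre.length)
        && ((pre ++ suf).map pvIsPrimeAlt).getD (pre.length - 1) false) = prev →
    (List.range' pre.length suf.length).foldl (pvStepB ((pre ++ suf).map pvIsPrimeAlt))
        (done ++ suf.map some)
      = done ++ pvMark pvIsPrimeAlt prev suf := by
  intro suf
  induction suf with
  | nil => intro pre done prev _ _; simp [pvMark]
  | cons x rest ih =>
      intro pre done prev hlen hprev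
      rw [List.length_cons, List.range'_succ, List.foldl_cons]
      have hflag : ((pre ++ x :: rest).map pvIsPrimeAlt).getD pre.length false = pvIsPrimeAlt x := by
        rw [List.getD_eq_getElem?_getD, List.map_append, List.getElem?_append_right (by simp)]
        simp
      have hstep : pvStepB ((pre ++ x :: rest).map pvIsPrimeAlt) (done ++ (x :: rest).map some) pre.length
          = (done ++ [if pvIsPrimeAlt x || prev then none else some x]) ++ rest.map some := by
        rw [pvStepB, hflag, hprev]
        by_cases hc : pvIsPrimeAlt x || prev
        · rw [if_pos (by simp [hc]), List.set_append_right _ _ (le_of_eq hlen), ← hlen, Nat.sub_self]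
          simp [hc]
        · rw [if_neg (by simp [hc])]
          simp [hc]
      rw [hstep]
      have hassoc : pre ++ x :: rest = (pre ++ [x]) ++ rest := by simp
      have hlen' : pre.length + 1 = (pre ++ [x]).length := by simp
      rw [hassoc, hlen']
      rw [ih (pre ++ [x]) (done ++ [if pvIsPrimeAlt x || prev then none else some x]) (pvIsPrimeAlt x)
        (by simp [hlen]) ?_]
      · simp [pvMark]
      · rw [List.getD_eq_getElem?_getD, List.map_append, List.map_append]
        rw [List.getElem?_append_left (by simp)]
        simp

lemma pv_sansA_eq (numbers : List Int) :
    sans_primes numbers = (pvMark pvIsPrime false numbers).filterMap id := by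
  have h := pv_foldA_inv numbers [] false
  rw [List.nil_append, List.length_nil, ← List.range_eq_range'] at h
  simp [sans_primes, h]

lemma pv_sansB_eq (numbers : List Int) :
    sans_primes_alt numbers = (pvMark pvIsPrimeAlt false numbers).filterMap id := by
  have h := pv_foldB_inv numbers [] [] false rfl (by simp)
  rw [List.nil_append, List.nil_append, List.length_nil, ← List.range_eq_range'] at h
  simp [sans_primes_alt, h]

-- ===== VERDICT (by name: the statement is the Claim_ definition above) =====
theorem sans_primes_spec : Claim_equal_sans_primes := by
  intro numbers _
  unfold Spec_sans_primes
  rw [pv_sansA_eq, pv_sansB_eq, pv_prime_eq]
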